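-- pv_equiv track=rewrite | github.com/uw-bionlp/covid-parser | covid/annotate/standoff_create.py | unmerge_entities
-- ===== SOURCE A (Python) =====
-- import copy
--
-- def unmerge_entities(labels, merged_entity, outside):
-- #def unmerge_entities(labels, events, entities, merged_entity, outside):
--     '''
--     Unmerge entities for a single sentence
--
--     args:
--         labels = list of dict of labels for each sentence
--         events = events to modify (e.g. [Alcohol, Drug...])
--         entities = entities that were merged (e.g. [Amount, Frequency...])
--         merged_entity = name of merged entity (e.g. Quantity)
--         outside = outside label (e.g. 'O')
--     '''
--
--
--     # No labels, perpetuate value of None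
--     if labels is None:
--         return None
--
--     # Labels found
--     else:
--
--         # Initialize new sentence labels
--         new_labels = copy.deepcopy(labels)
--
--         # Loop on events (e.g. Alcohol, Drug, Tobacco)
--         for evt in labels:
--
--             # Get all entities
--             entities = set(labels[evt][merged_entity])
--             if outside in entities:
--                 entities.remove(outside)
--
--             # Loop on unmerged entities (e.g. Amount, Frequency, etc.)
--             for ent in entities:
--
--                 # Loop on entity labels in sentence
--                 L = []
--                 for entity_label in labels[evt][merged_entity]:
--
--                     if entity_label == ent:
--                         L.append(ent)
--                     else:
--                         L.append(outside)
--
--                 new_labels[evt][ent] = L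
--
--             # Remove merged label
--             del new_labels[evt][merged_entity]
--
--         return new_labels
-- ===== SOURCE B (Python) =====
-- import copy
--
-- def unmerge_entities(labels, merged_entity, outside):
--     # One pass over the merged label list per event: every per-entity list is
--     # created on first sight (filled with `outside`) and positions filled in place.
--     if labels is None:
--         return None
--     new_labels = copy.deepcopy(labels)
--     for evt, ents in labels.items():
--         merged = ents[merged_entity]
--         per_ent = {}
--         for i, v in enumerate(merged):
--             if v != outside:
--                 per_ent.setdefault(v, [outside] * len(merged))[i] = v
--         for ent, L in per_ent.items():
--             new_labels[evt][ent] = L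
--         del new_labels[evt][merged_entity]
--     return new_labels
-- ===== Notes on version B (the rewrite author's own statement) =====
-- stated objective: alternative
-- what changed: A loops over the set of distinct entities and rescans the merged label list once per entity; B makes a single indexed pass over the merged list, creating each entity's outside-filled list on first sight and setting positions in place. Pre_ excludes inputs where A raises KeyError (an event without the merged_entity key) and association lists with duplicate keys, which do not faithfully represent a Python dict.
import Mathlib
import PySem

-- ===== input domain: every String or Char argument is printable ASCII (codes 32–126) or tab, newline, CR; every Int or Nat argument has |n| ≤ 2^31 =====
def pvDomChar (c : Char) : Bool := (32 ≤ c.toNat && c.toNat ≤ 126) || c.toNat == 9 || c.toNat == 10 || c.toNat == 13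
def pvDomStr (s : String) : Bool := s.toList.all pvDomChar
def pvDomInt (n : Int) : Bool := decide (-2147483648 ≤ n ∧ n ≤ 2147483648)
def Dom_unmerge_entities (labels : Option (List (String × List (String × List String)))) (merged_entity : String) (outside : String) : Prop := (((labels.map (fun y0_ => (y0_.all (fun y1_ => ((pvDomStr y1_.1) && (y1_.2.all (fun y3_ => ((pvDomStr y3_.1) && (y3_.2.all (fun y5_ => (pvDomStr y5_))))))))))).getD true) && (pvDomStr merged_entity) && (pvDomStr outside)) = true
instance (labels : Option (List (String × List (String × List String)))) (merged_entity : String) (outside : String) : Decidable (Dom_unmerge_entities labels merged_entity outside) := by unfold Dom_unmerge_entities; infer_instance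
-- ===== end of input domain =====

-- B replaces A's per-entity rescans of the merged label list by a single indexed pass that
-- fills every entity's list at once (objective: alternative decomposition, similar cost).

-- ===== PORT A =====
-- shared glue: the Python dicts are nested assoc lists; view them as PySem.Dict and back
def pvToDict (l : List (String × List (String × List String))) :
    PySem.Dict String (PySem.Dict String (List String)) :=
  PySem.Dict.mk (l.map (fun p => (p.1, PySem.Dict.mk p.2)))

def pvOfDict (d : PySem.Dict String (PySem.Dict String (List String))) :
    List (String × List (String × List String)) :=
  d.items.map (fun p => (p.1, p.2.items))

def unmerge_entities (labels : Option (List (String × List (String × List String)))) (merged_entity : String) (outside : String) : Option (List (String × List (String × List String))) :=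
  match labels with
  | none => none
  | some ls =>
    let labelsD := pvToDict ls
    -- new_labels = copy.deepcopy(labels); for evt in labels: …
    let final :=
      ls.foldl (fun new_labels p =>
        let evt := p.1
        -- labels[evt][merged_entity]; a missing key (Python KeyError) is excluded by Pre_
        let m := (labelsD.getD evt PySem.Dict.empty).getD merged_entity []
        let ents0 := PySem.Set.ofList m
        let ents := if PySem.Set.contains ents0 outside
                    then (PySem.Set.remove? ents0 outside).getD ents0  -- guarded by `contains`, remove? is `some` here
                    else ents0
        let new_labels :=
          ents.foldl (fun nl ent =>
            let L := m.foldl (fun L entity_label =>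
              if entity_label == ent then L ++ [ent] else L ++ [outside]) []
            nl.modify evt PySem.Dict.empty (fun inner => inner.insert ent L)) new_labels
        -- del new_labels[evt][merged_entity]
        new_labels.modify evt PySem.Dict.empty (fun inner => inner.erase merged_entity))
        labelsD
    some (pvOfDict final)

-- ===== PORT B =====
def unmerge_entities_alt (labels : Option (List (String × List (String × List String)))) (merged_entity : String) (outside : String) : Option (List (String × List (String × List String))) :=
  match labels with
  | none => none
  | some ls =>
    let final :=
      ls.foldl (fun new_labels p =>
        let evt := p.1
        let ents := PySem.Dict.mk p.2
        let merged := ents.getD merged_entity []  -- KeyError excluded by Pre_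
        let per_ent :=
          (PySem.List.enumerate merged).foldl (fun d iv =>
            if iv.2 != outside then
              -- per_ent.setdefault(v, [outside]*len(merged))[i] = v ; i from enumerate is ≥ 0, so .toNat is exact
              d.modify iv.2 (List.replicate merged.length outside) (fun L => L.set iv.1.toNat iv.2)
            else d) PySem.Dict.empty
        let new_labels :=
          per_ent.items.foldl (fun nl q =>
            nl.modify evt PySem.Dict.empty (fun inner => inner.insert q.1 q.2)) new_labels
        new_labels.modify evt PySem.Dict.empty (fun inner => inner.erase merged_entity))
        (pvToDict ls)
    some (pvOfDict final)

-- ===== PRECONDITION & SPEC =====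
-- Pre_ excludes (a) inputs where Python A raises KeyError (an event dict without the
-- merged_entity key) and (b) association lists with duplicate keys, which do not faithfully
-- represent a Python dict (Python keeps the last value of a duplicated key, assoc-list
-- lookup the first).
def Pre_unmerge_entities (labels : Option (List (String × List (String × List String)))) (merged_entity : String) (outside : String) : Prop :=
  ((labels.getD []).map (fun p => p.1)).Nodup ∧
  ∀ p ∈ labels.getD [], (p.2.map (fun q => q.1)).Nodup ∧ merged_entity ∈ p.2.map (fun q => q.1)
instance (labels : Option (List (String × List (String × List String)))) (merged_entity : String) (outside : String) : Decidable (Pre_unmerge_entities labels merged_entity outside) := by unfold Pre_unmerge_entities; infer_instance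

def pvWitness_unmerge_entities : (Option (List (String × List (String × List String)))) × String × String :=
  (some [("Alcohol", [("Quantity", ["a", "O", "a"])])], "Quantity", "O")

def Spec_unmerge_entities (labels : Option (List (String × List (String × List String)))) (merged_entity : String) (outside : String) (out : Option (List (String × List (String × List String)))) : Prop := out = unmerge_entities_alt labels merged_entity outside
instance (labels : Option (List (String × List (String × List String)))) (merged_entity : String) (outside : String) (out : Option (List (String × List (String × List String)))) : Decidable (Spec_unmerge_entities labels merged_entity outside out) := by unfold Spec_unmerge_entities; infer_instance

-- ===== CLAIM (what is proved, stated in full; the proofs are below) =====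
def Claim_equal_unmerge_entities : Prop := ∀ (labels : Option (List (String × List (String × List String)))) (merged_entity : String) (outside : String), Dom_unmerge_entities labels merged_entity outside → Pre_unmerge_entities labels merged_entity outside → Spec_unmerge_entities labels merged_entity outside (unmerge_entities labels merged_entity outside)

-- ===== LEMMAS AND PROOFS =====

lemma filter_foldl_add (p : String → Bool) :
    ∀ (m s : List String),
      (m.foldl PySem.Set.add s).filter p = (m.filter p).foldl PySem.Set.add (s.filter p) := by
  intro m
  induction m with
  | nil => intro s; simp
  | cons x t ih =>
    intro s
    simp only [List.foldl_cons, List.filter_cons]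
    cases hp : p x with
    | false =>
      have : (PySem.Set.add s x).filter p = s.filter p := by
        simp only [PySem.Set.add]
        split
        · rfl
        · simp [List.filter_append, hp]
      rw [ih, this]; simp
    | true =>
      have hc : (s.filter p).contains x = s.contains x := by
        simp [List.mem_filter, hp]
      have : (PySem.Set.add s x).filter p = PySem.Set.add (s.filter p) x := by
        simp only [PySem.Set.add, PySem.Set.contains, hc]
        split
        · rfl
        · simp [List.filter_append, hp]
      rw [ih, this]
      simp

lemma entsA_eq (m : List String) (o : String) :
    (if PySem.Set.contains (PySem.Set.ofList m) o
     then (PySem.Set.remove? (PySem.Set.ofList m) o).getD (PySem.Set.ofList m)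
     else PySem.Set.ofList m)
      = PySem.Set.ofList (m.filter (fun v => !(v == o))) := by
  cases hc : PySem.Set.contains (PySem.Set.ofList m) o with
  | true =>
    simp only [PySem.Set.remove?, hc, if_true, Option.getD_some]
    have : PySem.Set.discard (PySem.Set.ofList m) o
        = (PySem.Set.ofList m).filter (fun v => !(v == o)) := rfl
    rw [this]
    have h2 := filter_foldl_add (fun v => !(v == o)) m []
    simpa [PySem.Set.ofList, PySem.Set.empty] using h2
  | false =>
    have hno : o ∉ m := by
      simpa [PySem.Set.contains, List.contains_iff_mem, PySem.Set.mem_ofList] using hc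
    have : m.filter (fun v => !(v == o)) = m := by
      apply List.filter_eq_self.mpr
      intro v hv
      cases h2 : v == o with
      | false => simp
      | true => exact absurd (eq_of_beq h2 ▸ hv) hno
    simp [this]

lemma la_loop (m : List String) (e o : String) :
    m.foldl (fun L v => if v == e then L ++ [e] else L ++ [o]) []
      = m.map (fun v => if v == e then e else o) := by
  have h : ∀ v ∈ m, ∀ (L : List String),
      (if v == e then L ++ [e] else L ++ [o]) = L ++ [if v == e then e else o] := by
    intro v _ L; split <;> rfl
  rw [PySem.List.foldl_congr_mem' m _ (fun L v => L ++ [if v == e then e else o]) [] h]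
  simpa using PySem.List.foldl_append_singleton_eq_map (l := m) (f := fun v => if v == e then e else o) (acc := [])

lemma dict_modify_modify {κ ν : Type} [BEq κ] [LawfulBEq κ]
    (d : PySem.Dict κ ν) (k : κ) (d0 : ν) (f g : ν → ν) :
    (d.modify k d0 f).modify k d0 g = d.modify k d0 (fun x => g (f x)) := by
  simp [PySem.Dict.modify, PySem.Dict.insert_insert_self,
    PySem.Dict.getD_eq_get?_getD, PySem.Dict.get?_insert_self]

lemma foldl_modify_modify {κ ν β : Type} [BEq κ] [LawfulBEq κ]
    (k : κ) (d0 : ν) (F : β → ν → ν) (H : ν → ν) :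
    ∀ (xs : List β) (nl : PySem.Dict κ ν),
      (xs.foldl (fun nl x => nl.modify k d0 (F x)) nl).modify k d0 H
        = nl.modify k d0 (fun inner => H (xs.foldl (fun acc x => F x acc) inner)) := by
  intro xs
  induction xs with
  | nil => intro nl; rfl
  | cons x t ih =>
    intro nl
    simp only [List.foldl_cons]
    rw [ih, dict_modify_modify]

lemma val_ext (o v e : String) (pre : List String) (n : Nat)
    (hj : pre.length < n) (hne : (v == e) = false) :
    pre.map (fun u => if u == e then e else o) ++ List.replicate (n - pre.length) o
      = (pre ++ [v]).map (fun u => if u == e then e else o)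
          ++ List.replicate (n - (pre ++ [v]).length) o := by
  have hv : ¬ v = e := by simpa using hne
  rw [show n - pre.length = (n - (pre.length + 1)) + 1 by omega]
  simp [List.replicate_succ, hv]

lemma set_append_mid {α : Type} (l1 : List α) (a : α) (l2 : List α) (v : α) (j : Nat)
    (h : l1.length = j) : (l1 ++ a :: l2).set j v = l1 ++ v :: l2 := by
  subst h
  induction l1 with
  | nil => simp
  | cons x t ih => simp [ih]

lemma beq_symm_false {a b : String} (h : (a == b) = false) : (b == a) = false := by
  cases h2 : b == a with
  | false => rfl
  | true =>
    have hba : b = a := eq_of_beq h2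
    subst hba
    simp at h

lemma fill_loop (o : String) (n : Nat) :
    ∀ (t pre : List String) (d : PySem.Dict String (List String)),
      n = pre.length + t.length →
      d.items = (PySem.Set.ofList (pre.filter (fun u => !(u == o)))).map
          (fun e => (e, pre.map (fun u => if u == e then e else o)
              ++ List.replicate (n - pre.length) o)) →
      ((PySem.List.enumerate t (pre.length : Int)).foldl
          (fun d iv => if iv.2 != o
              then d.modify iv.2 (List.replicate n o) (fun L => L.set iv.1.toNat iv.2)
              else d) d).items
        = (PySem.Set.ofList ((pre ++ t).filter (fun u => !(u == o)))).map
            (fun e => (e, (pre ++ t).map (fun u => if u == e then e else o)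
                ++ List.replicate (n - (pre ++ t).length) o)) := by
  intro t
  induction t with
  | nil =>
    intro pre d hn hd
    simpa [PySem.List.enumerate] using hd
  | cons v t' ih =>
    intro pre d hn hd
    have hj : pre.length < n := by simp at hn; omega
    -- abbreviations
    set p : String → Bool := fun u => !(u == o) with hp
    set f : String → String → String := fun e u => if u == e then e else o with hf
    have hkeys : d.keys = PySem.Set.ofList (pre.filter p) := by
      show d.items.map (fun q => q.1) = _
      rw [hd, List.map_map]; simp [Function.comp_def]
    have hKnd : (PySem.Set.ofList (pre.filter p)).Nodup := PySem.Set.nodup_ofList _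
    have hdnd : d.keys.Nodup := by rw [hkeys]; exact hKnd
    have hmemo : ∀ e ∈ PySem.Set.ofList (pre.filter p), (e == o) = false := by
      intro e he
      have := (PySem.Set.mem_ofList _ e).mp he
      have := List.mem_filter.mp this
      simpa [hp] using this.2
    -- unfold one enumerate step
    have henum : PySem.List.enumerate (v :: t') (pre.length : Int)
        = ((pre.length : Int), v) :: PySem.List.enumerate t' ((pre.length : Int) + 1) := rfl
    rw [henum, List.foldl_cons]
    -- the next start index is (pre ++ [v]).length
    have hcast : ((pre.length : Int) + 1) = (((pre ++ [v]).length : Nat) : Int) := by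
      simp
    rw [hcast]
    have hgoal : ((pre ++ [v]) ++ t') = pre ++ v :: t' := by simp
    rw [← hgoal]
    -- apply the IH at pre ++ [v]
    apply ih (pre ++ [v])
    · simp at hn ⊢; omega
    -- remains: the invariant for the new dict state
    cases hv : v == o with
    | true =>
      have hveq : v = o := eq_of_beq hv
      have hbne : (v != o) = false := by simp [bne, hv]
      rw [hbne, if_neg (by simp)]
      -- key set unchanged
      have hkey : (pre ++ [v]).filter p = pre.filter p := by
        simp [hp, List.filter_append, hveq]
      rw [hd, hkey]
      apply List.map_congr_left
      intro e he
      have heo := hmemo e he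
      have hve : (v == e) = false := beq_symm_false (hveq ▸ heo)
      exact congrArg (fun L => (e, L)) (val_ext o v e pre n hj hve)
    | false =>
      have hbne : (v != o) = true := by simp [bne, hv]
      rw [hbne, if_pos rfl]
      have hpv : p v = true := by simp [hp, hv]
      have hkey : (pre ++ [v]).filter p = pre.filter p ++ [v] := by
        simp [List.filter_append, hpv]
      have hofl : PySem.Set.ofList (pre.filter p ++ [v])
          = PySem.Set.add (PySem.Set.ofList (pre.filter p)) v := by
        simp [PySem.Set.ofList, List.foldl_append]
      have htn : ((pre.length : Int)).toNat = pre.length := by simp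
      by_cases hvK : v ∈ PySem.Set.ofList (pre.filter p)
      · -- v already has a key: in-place update of its list
        have hcont : d.contains v = true := by
          rw [PySem.Dict.contains_iff_mem_keys, hkeys]; exact hvK
        have hget : d.getD v (List.replicate n o)
            = pre.map (f v) ++ List.replicate (n - pre.length) o := by
          apply PySem.Dict.getD_of_mem_items d _ hdnd
          rw [hd]
          exact List.mem_map.mpr ⟨v, hvK, rfl⟩
        have hnew : (pre.map (f v) ++ List.replicate (n - pre.length) o).set pre.length v
            = (pre ++ [v]).map (f v) ++ List.replicate (n - (pre ++ [v]).length) o := by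
          rw [show n - pre.length = (n - (pre.length + 1)) + 1 by omega, List.replicate_succ]
          rw [set_append_mid (pre.map (f v)) o _ v pre.length (by simp)]
          simp [hf]
        have hadd : PySem.Set.add (PySem.Set.ofList (pre.filter p)) v
            = PySem.Set.ofList (pre.filter p) := by
          simp only [PySem.Set.add, PySem.Set.contains]
          rw [if_pos (by simpa [List.contains_iff_mem] using hvK)]
        simp only [PySem.Dict.modify, htn]
        rw [PySem.Dict.items_insert_of_contains _ _ hcont, hget, hd, List.map_map, hkey, hofl, hadd]
        apply List.map_congr_left
        intro e he
        simp only [Function.comp]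
        cases hev : e == v with
        | true =>
          have : e = v := eq_of_beq hev
          subst this
          rw [hnew]
          simp [hf]
        | false =>
          have hve : (v == e) = false := beq_symm_false hev
          rw [val_ext o v e pre n hj hve]
          simp
      · -- fresh entity: a new key is appended
        have hcont : d.contains v = false := by
          rw [← Bool.not_eq_true, PySem.Dict.contains_iff_mem_keys, hkeys]
          simpa using hvK
        have hprem : pre.map (f v) = List.replicate pre.length o := by
          apply List.eq_replicate_iff.mpr
          constructor
          · simp
          · intro b hb
            obtain ⟨u, hu, hub⟩ := List.mem_map.mp hb
            cases huv : u == v with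
            | true =>
              exfalso
              apply hvK
              rw [PySem.Set.mem_ofList]
              rw [← eq_of_beq huv] at hpv ⊢
              exact List.mem_filter.mpr ⟨hu, hpv⟩
            | false =>
              rw [← hub, hf]
              simp only [huv, Bool.false_eq_true, if_false]
        have hnew : (List.replicate n o).set pre.length v
            = (pre ++ [v]).map (f v) ++ List.replicate (n - (pre ++ [v]).length) o := by
          conv_lhs => rw [show n = pre.length + (n - pre.length) by omega, List.replicate_add,
            show n - pre.length = (n - (pre.length + 1)) + 1 by omega, List.replicate_succ]
          rw [set_append_mid (List.replicate pre.length o) o _ v pre.length (by simp)]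
          rw [List.map_append, hprem]
          simp [hf]
        have hadd : PySem.Set.add (PySem.Set.ofList (pre.filter p)) v
            = PySem.Set.ofList (pre.filter p) ++ [v] := by
          simp only [PySem.Set.add, PySem.Set.contains]
          rw [if_neg (by simpa [List.contains_iff_mem] using hvK)]
        simp only [PySem.Dict.modify, htn]
        rw [PySem.Dict.items_insert_of_not_contains _ _ hcont, hd, hkey, hofl, hadd,
          PySem.Dict.getD_of_not_contains _ _ hcont, hnew]
        conv_rhs => rw [List.map_append]
        congr 1
        apply List.map_congr_left
        intro e he
        have hev : (e == v) = false := by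
          cases h2 : e == v with
          | false => rfl
          | true => exact absurd (eq_of_beq h2 ▸ he) hvK
        have hve : (v == e) = false := beq_symm_false hev
        exact congrArg (fun L => (e, L)) (val_ext o v e pre n hj hve)

lemma perEnt_items (m : List String) (o : String) :
    ((PySem.List.enumerate m).foldl (fun d iv => if iv.2 != o
        then d.modify iv.2 (List.replicate m.length o) (fun L => L.set iv.1.toNat iv.2)
        else d) PySem.Dict.empty).items
      = (PySem.Set.ofList (m.filter (fun u => !(u == o)))).map
          (fun e => (e, m.map (fun u => if u == e then e else o))) := by
  have h := fill_loop o m.length m [] PySem.Dict.empty (by simp) (by simp [PySem.Dict.empty])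
  have h0 : ((List.length ([] : List String) : Nat) : Int) = 0 := by simp
  rw [h0] at h
  simpa using h

lemma lookup_self (ls : List (String × List (String × List String)))
    (hnd : (ls.map (fun p => p.1)).Nodup) (p : String × List (String × List String))
    (hp : p ∈ ls) :
    (pvToDict ls).get? p.1 = some (PySem.Dict.mk p.2) := by
  apply PySem.Dict.get?_of_mem_items
  · exact List.mem_map.mpr ⟨p, hp, rfl⟩
  · show ((pvToDict ls).items.map (fun q => q.1)).Nodup
    have : (pvToDict ls).items.map (fun q => q.1) = ls.map (fun p => p.1) := by
      simp [pvToDict]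
    rw [this]; exact hnd

lemma foldl_insert_pairs (K : List String) (g : String → List String)
    (inner : PySem.Dict String (List String)) :
    K.foldl (fun acc e => acc.insert e (g e)) inner
      = (K.map (fun e => (e, g e))).foldl (fun acc q => acc.insert q.1 q.2) inner := by
  induction K generalizing inner with
  | nil => rfl
  | cons x t ih => simp only [List.foldl_cons, List.map_cons]; exact ih _

-- ===== VERDICT (by name: the statement is the Claim_ definition above) =====
theorem unmerge_entities_spec : Claim_equal_unmerge_entities := by
  intro labels merged_entity outside _hdom hpre
  unfold Spec_unmerge_entities
  cases labels with
  | none => rfl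
  | some ls =>
    obtain ⟨hnd, _hin⟩ := hpre
    simp only [Option.getD_some] at hnd
    simp only [unmerge_entities, unmerge_entities_alt]
    congr 1
    apply congrArg
    apply PySem.List.foldl_congr_mem'
    intro p hp nl
    -- the global lookup resolves to the entry's own inner dict
    have hA : (pvToDict ls).getD p.1 PySem.Dict.empty = PySem.Dict.mk p.2 := by
      rw [PySem.Dict.getD_eq_get?_getD, lookup_self ls hnd p hp]; rfl
    rw [hA]
    set m := (PySem.Dict.mk p.2).getD merged_entity [] with hm
    -- collapse each side into one modify at this event
    rw [entsA_eq m outside]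
    rw [foldl_modify_modify p.1 PySem.Dict.empty
      (fun ent inner => inner.insert ent
        (m.foldl (fun L entity_label =>
          if entity_label == ent then L ++ [ent] else L ++ [outside]) []))
      (fun inner => inner.erase merged_entity)]
    rw [foldl_modify_modify p.1 PySem.Dict.empty
      (fun (q : String × List String) inner => inner.insert q.1 q.2)
      (fun inner => inner.erase merged_entity)]
    apply congrArg
    funext inner
    apply congrArg (fun d => PySem.Dict.erase d merged_entity)
    -- A's per-entity loops are the per-entity map lists
    rw [PySem.List.foldl_congr_mem'
      (PySem.Set.ofList (m.filter (fun v => !(v == outside))))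
      _ (fun acc e => acc.insert e (m.map (fun u => if u == e then e else outside))) inner
      (by intro e _ acc; rw [la_loop m e outside])]
    rw [foldl_insert_pairs]
    rw [← perEnt_items m outside]
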